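-- pv_equiv track=rewrite | github.com/jangari/PDF-indexer | generate-index.py | elide
-- ===== SOURCE A (Python) =====
-- def elide(start,end):
--     elide=0
--     if len(start) == len(end):
--         for i in range(0,len(start)):
--             if start[i] == end[i]:
--                 if i == len(start)-2 and end[-2] == "1":
--                     continue
--                 else:
--                     elide=i+1
--             else:
--                 break
--     return start, end[elide:]
-- ===== SOURCE B (Python) =====
-- def elide(start, end):
--     if len(start) != len(end):
--         return start, end
--     n = len(start)
--     # binary search for the longest k with start[:k] == end[:k]
--     lo, hi = 0, n
--     while lo < hi:
--         mid = (lo + hi + 1) // 2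
--         if start[:mid] == end[:mid]:
--             lo = mid
--         else:
--             hi = mid - 1
--     e = lo
--     if n >= 2 and lo == n - 1 and end[-2] == "1":
--         e = lo - 1
--     return start, end[e:]
-- ===== Notes on version B (the rewrite author's own statement) =====
-- stated objective: alternative
-- what changed: B finds the longest matching prefix by BINARY SEARCH on the prefix length using whole-prefix equality tests (start[:mid] == end[:mid]), then applies the penultimate-'1' skip as one closed-form post-loop adjustment, instead of A's linear indexed character scan with an inline continue special case.
import Mathlib
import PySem

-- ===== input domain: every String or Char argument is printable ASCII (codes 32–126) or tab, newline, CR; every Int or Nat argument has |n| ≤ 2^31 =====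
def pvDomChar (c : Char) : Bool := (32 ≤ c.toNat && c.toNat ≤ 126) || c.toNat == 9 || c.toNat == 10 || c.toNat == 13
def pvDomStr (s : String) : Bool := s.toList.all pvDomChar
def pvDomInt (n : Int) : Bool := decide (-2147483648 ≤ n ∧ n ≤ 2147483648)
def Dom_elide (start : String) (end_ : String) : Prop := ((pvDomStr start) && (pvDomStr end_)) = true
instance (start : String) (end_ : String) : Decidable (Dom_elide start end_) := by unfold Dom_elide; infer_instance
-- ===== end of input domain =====

-- B finds the longest matching prefix by binary search on the prefix length (whole-prefix
-- equality tests) and applies the penultimate-'1' skip as one closed-form post-loop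
-- adjustment (objective: alternative algorithm); A and B proved equal on all inputs.


-- ===== PORT A =====
-- A's for-loop over i in range(0, len(start)) with break/continue; `i + 2 = s.length`
-- is Python's `i == len(start)-2` (i ≥ 0, so never true for len < 2, matching Python's -2).
def elideA_loop (s e : List Char) (i acc : Nat) : Nat :=
  if i < s.length then
    if s.getD i ' ' = e.getD i ' ' then
      if i + 2 = s.length ∧ e.getD (e.length - 2) ' ' = '1' then
        elideA_loop s e (i + 1) acc          -- continue (elide unchanged)
      else
        elideA_loop s e (i + 1) (i + 1)      -- elide = i + 1
    else acc                                  -- break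
  else acc
termination_by s.length - i

-- end[elide:] with elide ≥ 0 is an exact List.drop
def elide (start : String) (end_ : String) : String × String :=
  let s := start.toList
  let e := end_.toList
  let el := if s.length = e.length then elideA_loop s e 0 0 else 0
  (start, String.ofList (e.drop el))

-- ===== PORT B =====
-- B's while-loop: binary search for the largest k with start[:k] == end[:k];
-- start[:k] is an exact List.take for k ≥ 0.
def bsearchLCP (s e : List Char) (lo hi : Nat) : Nat :=
  if lo < hi then
    let mid := (lo + hi + 1) / 2
    if s.take mid = e.take mid then bsearchLCP s e mid hi
    else bsearchLCP s e lo (mid - 1)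
  else lo
termination_by hi - lo
decreasing_by all_goals omega

def elide_alt (start : String) (end_ : String) : String × String :=
  let s := start.toList
  let e := end_.toList
  if s.length ≠ e.length then (start, end_)
  else
    let n := s.length
    let cpl := bsearchLCP s e 0 n
    let el := if 2 ≤ n ∧ cpl = n - 1 ∧ e.getD (e.length - 2) ' ' = '1'
              then cpl - 1 else cpl
    (start, String.ofList (e.drop el))

-- ===== PRECONDITION & SPEC =====
def Spec_elide (start : String) (end_ : String) (out : String × String) : Prop := out = elide_alt start end_
instance (start : String) (end_ : String) (out : String × String) : Decidable (Spec_elide start end_ out) := by unfold Spec_elide; infer_instance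

-- ===== CLAIM (what is proved, stated in full; the proofs are below) =====
def Claim_equal_elide : Prop := ∀ (start : String) (end_ : String), Dom_elide start end_ → Spec_elide start end_ (elide start end_)

-- ===== LEMMAS AND PROOFS =====

-- proof-only reference value: the common-prefix length
def lcpLen : List Char → List Char → Nat
  | a :: s, b :: e => if a = b then lcpLen s e + 1 else 0
  | _, _ => 0

theorem lcpLen_le (s : List Char) : ∀ e : List Char, lcpLen s e ≤ s.length := by
  induction s with
  | nil => intro e; cases e <;> simp [lcpLen]
  | cons a t ih =>
    intro e
    cases e with
    | nil => simp [lcpLen]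
    | cons b u =>
      by_cases h : a = b <;> simp [lcpLen, h]
      exact ih u

-- for k ≤ |s| (with |s| = |e|): start[:k] == end[:k] iff k ≤ lcp
theorem take_eq_iff (s : List Char) : ∀ (e : List Char) (k : Nat),
    s.length = e.length → k ≤ s.length →
    (s.take k = e.take k ↔ k ≤ lcpLen s e) := by
  induction s with
  | nil =>
    intro e k hlen hk
    simp at hk
    simp [hk]
  | cons a t ih =>
    intro e k hlen hk
    cases e with
    | nil => simp at hlen
    | cons b u =>
      cases k with
      | zero => simp
      | succ j =>
        simp only [List.take_succ_cons, List.cons.injEq]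
        by_cases hab : a = b
        · subst hab
          simp only [lcpLen, if_true, true_and]
          rw [ih u j (by simpa using hlen) (by simpa using hk)]
          omega
        · simp [lcpLen, hab]

theorem bsearchLCP_eq (s e : List Char) (hlen : s.length = e.length) :
    ∀ (d lo hi : Nat), hi - lo ≤ d → lo ≤ lcpLen s e → lcpLen s e ≤ hi → hi ≤ s.length →
    bsearchLCP s e lo hi = lcpLen s e := by
  intro d
  induction d with
  | zero =>
    intro lo hi hd hlo hhi _
    rw [bsearchLCP, if_neg (by omega)]
    omega
  | succ d ih =>
    intro lo hi hd hlo hhi hhn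
    by_cases hlt : lo < hi
    · rw [bsearchLCP, if_pos hlt]
      have hmid1 : lo < (lo + hi + 1) / 2 := by omega
      have hmid2 : (lo + hi + 1) / 2 ≤ hi := by omega
      by_cases hp : s.take ((lo + hi + 1) / 2) = e.take ((lo + hi + 1) / 2)
      · rw [if_pos hp]
        have : (lo + hi + 1) / 2 ≤ lcpLen s e :=
          (take_eq_iff s e _ hlen (by omega)).mp hp
        exact ih _ hi (by omega) this hhi hhn
      · rw [if_neg hp]
        have : ¬ ((lo + hi + 1) / 2 ≤ lcpLen s e) := fun h =>
          hp ((take_eq_iff s e _ hlen (by omega)).mpr h)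
        exact ih lo _ (by omega) hlo (by omega) (by omega)
    · rw [bsearchLCP, if_neg hlt]
      omega

-- lcp characterisation by positions, used to relate A's indexed scan to lcpLen
theorem lcpLen_pos_match (s : List Char) : ∀ (e : List Char) (j : Nat),
    j < lcpLen s e → s.getD j ' ' = e.getD j ' ' := by
  induction s with
  | nil => intro e j h; cases e <;> simp [lcpLen] at h
  | cons a t ih =>
    intro e j h
    cases e with
    | nil => simp [lcpLen] at h
    | cons b u =>
      by_cases hab : a = b
      · cases j with
        | zero => simpa using hab
        | succ i =>
          simp only [lcpLen, if_pos hab] at h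
          simpa using ih u i (by omega)
      · simp [lcpLen, hab] at h

theorem lcpLen_pos_stop (s : List Char) : ∀ e : List Char,
    s.length = e.length → lcpLen s e < s.length →
    s.getD (lcpLen s e) ' ' ≠ e.getD (lcpLen s e) ' ' := by
  induction s with
  | nil => intro e _ h; simp at h
  | cons a t ih =>
    intro e hlen hlt
    cases e with
    | nil => simp at hlen
    | cons b u =>
      by_cases hab : a = b
      · simp only [lcpLen, if_pos hab] at hlt ⊢
        simpa using ih u (by simpa using hlen) (by simpa using hlt)
      · simpa [lcpLen, hab] using hab

-- B's elide value as a function of the lists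
def elAltVal (s e : List Char) : Nat :=
  if 2 ≤ s.length ∧ lcpLen s e = s.length - 1 ∧ e.getD (e.length - 2) ' ' = '1'
  then lcpLen s e - 1 else lcpLen s e

-- the main loop invariant: starting at any reachable state (i ≤ first mismatch, acc as
-- A leaves it), A's loop ends at B's closed-form value
theorem loopA_eq (s e : List Char) (hlen : s.length = e.length) :
    ∀ (k i acc : Nat), s.length - i = k → i ≤ lcpLen s e →
    (acc = if i = s.length - 1 ∧ 2 ≤ s.length ∧ e.getD (e.length - 2) ' ' = '1'
           then i - 1 else i) →
    elideA_loop s e i acc = elAltVal s e := by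
  intro k
  induction k with
  | zero =>
    intro i acc hk hi hacc
    have hle := lcpLen_le s e
    have hi' : i = s.length := by omega
    have hL : lcpLen s e = s.length := by omega
    rw [elideA_loop]
    simp only [hi', lt_irrefl, if_false]
    unfold elAltVal
    rw [hL]
    have h1 : ¬ (2 ≤ s.length ∧ s.length = s.length - 1 ∧ e.getD (e.length - 2) ' ' = '1') := by
      rintro ⟨h2, h3, _⟩; omega
    rw [if_neg h1]
    subst hi'
    have h2 : ¬ (s.length = s.length - 1 ∧ 2 ≤ s.length ∧ e.getD (e.length - 2) ' ' = '1') := by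
      rintro ⟨h3, h4, _⟩; omega
    rw [hacc, if_neg h2]
  | succ k ih =>
    intro i acc hk hi hacc
    have hlt : i < s.length := by omega
    rw [elideA_loop]
    rw [if_pos hlt]
    by_cases hmatch : s.getD i ' ' = e.getD i ' '
    · rw [if_pos hmatch]
      have hi' : i < lcpLen s e := by
        rcases Nat.lt_or_ge i (lcpLen s e) with h | h
        · exact h
        · exfalso
          have : i = lcpLen s e := by omega
          exact lcpLen_pos_stop s e hlen (this ▸ hlt) (this ▸ hmatch)
      by_cases hskip : i + 2 = s.length ∧ e.getD (e.length - 2) ' ' = '1'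
      · rw [if_pos hskip]
        apply ih (i + 1) acc (by omega) (by omega)
        have hc1 : i + 1 = s.length - 1 ∧ 2 ≤ s.length ∧ e.getD (e.length - 2) ' ' = '1' := by
          exact ⟨by omega, by omega, hskip.2⟩
        rw [if_pos hc1]
        have : ¬ (i = s.length - 1 ∧ 2 ≤ s.length ∧ e.getD (e.length - 2) ' ' = '1') := by
          rintro ⟨h1, _, _⟩; omega
        rw [hacc, if_neg this]
        omega
      · rw [if_neg hskip]
        apply ih (i + 1) (i + 1) (by omega) (by omega)
        have : ¬ (i + 1 = s.length - 1 ∧ 2 ≤ s.length ∧ e.getD (e.length - 2) ' ' = '1') := by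
          rintro ⟨h1, h2, h3⟩
          exact hskip ⟨by omega, h3⟩
        rw [if_neg this]
    · rw [if_neg hmatch]
      have hiL : i = lcpLen s e := by
        rcases Nat.lt_or_ge i (lcpLen s e) with h | h
        · exact absurd (lcpLen_pos_match s e i h) hmatch
        · omega
      unfold elAltVal
      rw [← hiL, hacc]
      by_cases hc : i = s.length - 1 ∧ 2 ≤ s.length ∧ e.getD (e.length - 2) ' ' = '1'
      · rw [if_pos hc, if_pos ⟨hc.2.1, hc.1, hc.2.2⟩]
      · rw [if_neg hc]
        have : ¬ (2 ≤ s.length ∧ i = s.length - 1 ∧ e.getD (e.length - 2) ' ' = '1') := by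
          rintro ⟨h1, h2, h3⟩
          exact hc ⟨h2, h1, h3⟩
        rw [if_neg this]

-- ===== VERDICT (by name: the statement is the Claim_ definition above) =====
theorem elide_spec : Claim_equal_elide := by
  intro start end_ _hdom
  unfold Spec_elide elide elide_alt
  by_cases hlen : start.toList.length = end_.toList.length
  · simp only [hlen, if_true, ne_eq, not_true_eq_false, if_false]
    have hA := loopA_eq start.toList end_.toList hlen
      (start.toList.length - 0) 0 0 rfl (Nat.zero_le _)
      (by
        by_cases hc : (0 : Nat) = start.toList.length - 1 ∧ 2 ≤ start.toList.length ∧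
            end_.toList.getD (end_.toList.length - 2) ' ' = '1'
        · rcases hc with ⟨h1, h2, _⟩; omega
        · rw [if_neg hc])
    have hB := bsearchLCP_eq start.toList end_.toList hlen
      end_.toList.length 0 end_.toList.length le_rfl (Nat.zero_le _)
      (hlen ▸ lcpLen_le _ _) (le_of_eq hlen.symm)
    rw [hA, hB]
    simp [elAltVal, hlen]
  · simp only [hlen, if_false, ne_eq, not_false_eq_true, if_pos, List.drop_zero]
    rw [String.ofList_toList]
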